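-- pv_equiv track=rewrite | github.com/InterceptArcher/AMD1-1_Alpha_MarketoAcroformTest | backend/app/services/executive_review_service.py | _industries_similar
-- ===== SOURCE A (Python) =====
-- def _industries_similar(industry1: str, industry2: str) -> bool:
--     """Check if two industries are in the same category."""
--     industry_groups = [
--         {"retail", "ecommerce", "consumer"},
--         {"healthcare", "life sciences", "pharma", "medical"},
--         {"financial services", "banking", "insurance", "fintech"},
--         {"manufacturing", "industrial", "automotive"},
--         {"technology", "software", "telecommunications", "tech"},
--         {"energy", "utilities", "oil and gas"},
--     ]
--
--     i1_lower = industry1.lower()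
--     i2_lower = industry2.lower()
--
--     for group in industry_groups:
--         if any(term in i1_lower for term in group) and any(term in i2_lower for term in group):
--             return True
--     return False
-- ===== SOURCE B (Python) =====
-- _INDUSTRY_GROUPS = [
--     ["retail", "ecommerce", "consumer"],
--     ["healthcare", "life sciences", "pharma", "medical"],
--     ["financial services", "banking", "insurance", "fintech"],
--     ["manufacturing", "industrial", "automotive"],
--     ["technology", "software", "telecommunications", "tech"],
--     ["energy", "utilities", "oil and gas"],
-- ]
--
-- # Flat keyword table: each term is tagged with the bit of its group.
-- _TERM_BITS = [(term, 1 << g)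
--               for g, group in enumerate(_INDUSTRY_GROUPS)
--               for term in group]
--
--
-- def _category_mask(industry):
--     """Integer bitmask with bit g set iff the industry matches group g."""
--     low = industry.lower()
--     mask = 0
--     for term, bit in _TERM_BITS:
--         if term in low:
--             mask |= bit
--     return mask
--
--
-- def _industries_similar(industry1: str, industry2: str) -> bool:
--     return (_category_mask(industry1) & _category_mask(industry2)) != 0
-- ===== Notes on version B (the rewrite author's own statement) =====
-- stated objective: alternative
-- what changed: Replaces A's per-group 'both strings match' short-circuit loop over sets by a flat term-to-bit keyword table folded into one integer bitmask per industry, with similarity decided by a single bitwise AND of the two masks.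
import Mathlib
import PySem

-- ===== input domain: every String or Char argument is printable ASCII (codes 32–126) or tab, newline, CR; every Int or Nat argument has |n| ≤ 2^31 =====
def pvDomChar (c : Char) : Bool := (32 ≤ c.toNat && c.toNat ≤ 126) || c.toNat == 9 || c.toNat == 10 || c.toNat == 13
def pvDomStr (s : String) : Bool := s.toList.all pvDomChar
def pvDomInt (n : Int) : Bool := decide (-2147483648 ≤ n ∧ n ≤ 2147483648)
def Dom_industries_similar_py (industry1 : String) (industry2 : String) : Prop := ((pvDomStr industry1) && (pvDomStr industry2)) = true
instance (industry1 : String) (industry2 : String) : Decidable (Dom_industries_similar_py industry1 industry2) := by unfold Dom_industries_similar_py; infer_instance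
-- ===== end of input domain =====

-- B replaces A's per-group "both strings match" loop by a flat term→bit keyword
-- table folded into one integer bitmask per industry, intersected by bitwise AND
-- (objective: alternative algorithm/data structure, same cost).

def pvGroups : List (List String) :=
  [ ["retail", "ecommerce", "consumer"],
    ["healthcare", "life sciences", "pharma", "medical"],
    ["financial services", "banking", "insurance", "fintech"],
    ["manufacturing", "industrial", "automotive"],
    ["technology", "software", "telecommunications", "tech"],
    ["energy", "utilities", "oil and gas"] ]

-- ===== PORT A =====
def industries_similar_py (industry1 : String) (industry2 : String) : Bool :=
  let i1_lower := PySem.Str.lower industry1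
  let i2_lower := PySem.Str.lower industry2
  pvGroups.any (fun group =>
    group.any (fun term => PySem.Str.isIn term i1_lower) &&
    group.any (fun term => PySem.Str.isIn term i2_lower))

-- ===== PORT B =====
-- flat keyword table: each term tagged with the bit of its group (Python's _TERM_BITS)
def pvTermBits : List (String × Nat) :=
  pvGroups.zipIdx.flatMap (fun gt => gt.1.map (fun t => (t, 1 <<< gt.2)))

def pvCategoryMask (industry : String) : Nat :=
  let low := PySem.Str.lower industry
  pvTermBits.foldl (fun m tb => if PySem.Str.isIn tb.1 low then m ||| tb.2 else m) 0

def industries_similar_py_alt (industry1 : String) (industry2 : String) : Bool :=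
  (pvCategoryMask industry1 &&& pvCategoryMask industry2) != 0

-- ===== PRECONDITION & SPEC =====
def Spec_industries_similar_py (industry1 : String) (industry2 : String) (out : Bool) : Prop := out = industries_similar_py_alt industry1 industry2
instance (industry1 : String) (industry2 : String) (out : Bool) : Decidable (Spec_industries_similar_py industry1 industry2 out) := by unfold Spec_industries_similar_py; infer_instance

-- ===== CLAIM (what is proved, stated in full; the proofs are below) =====
def Claim_equal_industries_similar_py : Prop := ∀ (industry1 : String) (industry2 : String), Dom_industries_similar_py industry1 industry2 → Spec_industries_similar_py industry1 industry2 (industries_similar_py industry1 industry2)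

-- ===== LEMMAS AND PROOFS =====

-- folding one group's terms (all tagged with bit i) into the mask
theorem testBit_fold_terms (low : String) (ts : List String) :
    ∀ (i m0 g : Nat),
      (ts.foldl (fun m t => if PySem.Str.isIn t low then m ||| 1 <<< i else m) m0).testBit g
        = (m0.testBit g || (decide (i = g) && ts.any (fun t => PySem.Str.isIn t low))) := by
  induction ts with
  | nil => simp
  | cons t ts ih =>
    intro i m0 g
    by_cases h : PySem.Str.isIn t low = true
    · simp only [List.foldl_cons, h, if_pos, List.any_cons]
      rw [ih]
      have hb : (1 <<< i : Nat) = 2 ^ i := by simp [Nat.shiftLeft_eq]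
      rw [hb, Nat.testBit_or, Nat.testBit_two_pow]
      cases hm : m0.testBit g <;> by_cases hig : i = g <;> simp [hig]
    · simp only [List.foldl_cons, h, if_neg, Bool.false_eq_true, not_false_eq_true,
        List.any_cons]
      rw [ih]
      simp

-- folding the whole flat keyword table, starting the group index at i
theorem testBit_fold_flat (low : String) (gs : List (List String)) :
    ∀ (i m0 g : Nat),
      (((gs.zipIdx i).flatMap (fun gt => gt.1.map (fun t => (t, 1 <<< gt.2)))).foldl
          (fun m tb => if PySem.Str.isIn tb.1 low then m ||| tb.2 else m) m0).testBit g
        = (m0.testBit g ||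
            (gs.zipIdx i).any (fun gt =>
              decide (gt.2 = g) && gt.1.any (fun t => PySem.Str.isIn t low))) := by
  induction gs with
  | nil => simp
  | cons x gs ih =>
    intro i m0 g
    simp only [List.zipIdx_cons, List.flatMap_cons, List.foldl_append, List.foldl_map,
      List.any_cons, ih, testBit_fold_terms, Bool.or_assoc]

-- the mask's bits are exactly the matching groups
theorem testBit_mask (industry : String) (g : Nat) :
    (pvCategoryMask industry).testBit g
      = (pvGroups.zipIdx 0).any (fun gt =>
          decide (gt.2 = g) && gt.1.any (fun t => PySem.Str.isIn t (PySem.Str.lower industry))) := by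
  unfold pvCategoryMask pvTermBits
  rw [testBit_fold_flat]
  simp

theorem mem_zipIdx_zero {α : Type} {gs : List α} {p : α × Nat} :
    p ∈ gs.zipIdx 0 ↔ ∃ (h : p.2 < gs.length), gs[p.2] = p.1 := by
  simp [List.mem_zipIdx_iff_getElem?, List.getElem?_eq_some_iff]

theorem and_ne_zero_iff (m1 m2 : Nat) :
    ((m1 &&& m2) != 0) = true ↔ ∃ g, m1.testBit g = true ∧ m2.testBit g = true := by
  rw [bne_iff_ne]
  constructor
  · intro h
    by_contra hc
    apply h
    apply Nat.zero_of_testBit_eq_false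
    intro i
    rw [Nat.testBit_and]
    by_cases h1 : m1.testBit i = true
    · by_cases h2 : m2.testBit i = true
      · exact absurd ⟨i, h1, h2⟩ hc
      · simp [h2]
    · simp [h1]
  · rintro ⟨g, h1, h2⟩ h0
    have h3 : (m1 &&& m2).testBit g = true := by rw [Nat.testBit_and, h1, h2]; rfl
    rw [h0, Nat.zero_testBit] at h3
    exact Bool.false_ne_true h3

-- ===== VERDICT (by name: the statement is the Claim_ definition above) =====
theorem industries_similar_py_spec : Claim_equal_industries_similar_py := by
  intro industry1 industry2 _
  unfold Spec_industries_similar_py industries_similar_py industries_similar_py_alt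
  rw [Bool.eq_iff_iff, and_ne_zero_iff]
  simp only [List.any_eq_true, Bool.and_eq_true, testBit_mask, decide_eq_true_eq]
  constructor
  · rintro ⟨group, hmem, h1, h2⟩
    obtain ⟨k, hk, rfl⟩ := List.mem_iff_getElem.mp hmem
    exact ⟨k, ⟨(pvGroups[k], k), mem_zipIdx_zero.mpr ⟨hk, rfl⟩, rfl, h1⟩,
            ⟨(pvGroups[k], k), mem_zipIdx_zero.mpr ⟨hk, rfl⟩, rfl, h2⟩⟩
  · rintro ⟨g, ⟨⟨x1, k1⟩, hm1, he1, h1⟩, ⟨x2, k2⟩, hm2, he2, h2⟩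
    obtain ⟨hk1, hv1⟩ := mem_zipIdx_zero.mp hm1
    obtain ⟨hk2, hv2⟩ := mem_zipIdx_zero.mp hm2
    simp only at he1 he2 hv1 hv2 h1 h2 hk1 hk2
    subst he1; subst he2
    refine ⟨x1, hv1 ▸ List.getElem_mem hk1, h1, ?_⟩
    have hgg : x2 = x1 := by rw [← hv1, ← hv2]
    exact hgg ▸ h2
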